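-- pv_equiv track=rewrite | github.com/dual/chilo | chilo_api/core/validator/openapi.py | __replace_dynamic_files_with_variales
-- ===== SOURCE A (Python) =====
-- def __replace_dynamic_files_with_variales(route_hyphonated):
--     replaced = []
--     for route in route_hyphonated.split('/'):
--         route_variable = route
--         if route.startswith('-'):
--             dynamic_hyphonated = route.replace('-', '', 1)
--             dynamic_file = dynamic_hyphonated.replace('-', '_')
--             route_variable = f'{{{dynamic_file}}}'
--         replaced.append(route_variable)
--     return '/'.join(replaced)
-- ===== SOURCE B (Python) =====
-- def __replace_dynamic_files_with_variales(route_hyphonated):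
--     # single left-to-right character scan with a small state machine
--     # (no split/join, no intermediate segment list)
--     out = []
--     at_start = True   # at the start of a segment
--     in_var = False    # inside a '{...}' being emitted
--     for ch in route_hyphonated:
--         if at_start and ch == '-':
--             out.append('{')
--             in_var = True
--         elif ch == '/':
--             if in_var:
--                 out.append('}')
--             out.append('/')
--             in_var = False
--         elif in_var and ch == '-':
--             out.append('_')
--         else:
--             out.append(ch)
--         at_start = ch == '/'
--     if in_var:
--         out.append('}')
--     return ''.join(out)
-- ===== Notes on version B (the rewrite author's own statement) =====
-- stated objective: alternative
-- what changed: Replaced A's segment-split / per-segment-rewrite / rejoin pipeline with a single left-to-right character scan driven by a two-flag state machine (segment start, inside variable) that emits the output directly, with no intermediate segment list.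
import Mathlib
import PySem

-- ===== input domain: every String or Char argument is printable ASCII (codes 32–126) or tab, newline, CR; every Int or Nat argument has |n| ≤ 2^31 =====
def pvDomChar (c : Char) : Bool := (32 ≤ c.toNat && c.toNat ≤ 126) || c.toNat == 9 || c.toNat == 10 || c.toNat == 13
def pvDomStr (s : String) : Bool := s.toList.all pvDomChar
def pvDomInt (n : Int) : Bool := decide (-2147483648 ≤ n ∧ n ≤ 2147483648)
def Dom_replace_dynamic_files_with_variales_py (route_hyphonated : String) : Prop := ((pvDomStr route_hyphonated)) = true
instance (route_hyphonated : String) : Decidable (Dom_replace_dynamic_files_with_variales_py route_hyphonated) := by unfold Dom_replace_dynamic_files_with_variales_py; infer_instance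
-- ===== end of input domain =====

-- B replaces A's split / per-segment rewrite / join with a single left-to-right
-- character scan (a small state machine); objective: alternative algorithm, same cost.

-- ===== PORT A =====
-- hand port of route.replace('-', '', 1): remove the first '-' (exact, since old is the
-- single character '-' and new is empty)
def pvReplaceFirst1 : List Char → List Char
  | [] => []
  | c :: t => if c = '-' then t else c :: pvReplaceFirst1 t

def replace_dynamic_files_with_variales_py (route_hyphonated : String) : String :=
  let replaced : List (List Char) :=
    (PySem.Chars.splitOn route_hyphonated.toList ['/']).foldl
      (fun acc route =>
        let route_variable := route
        let route_variable :=
          if PySem.Chars.startswith route ['-'] then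
            let dynamic_hyphonated := pvReplaceFirst1 route
            let dynamic_file := PySem.Chars.replace dynamic_hyphonated ['-'] ['_']
            '{' :: dynamic_file ++ ['}']
          else route_variable
        acc ++ [route_variable]) []
  String.mk (PySem.Chars.join ['/'] replaced)

-- ===== PORT B =====
-- state machine of Source B: at_start = at the start of a segment, inv = inside a '{...}'
def pvScanB : List Char → Bool → Bool → List Char
  | [], _, inv => if inv then ['}'] else []
  | ch :: rest, at_start, inv =>
    if at_start && ch == '-' then
      '{' :: pvScanB rest (ch == '/') true
    else if ch == '/' then
      (if inv then ['}'] else []) ++ '/' :: pvScanB rest (ch == '/') false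
    else if inv && ch == '-' then
      '_' :: pvScanB rest (ch == '/') inv
    else
      ch :: pvScanB rest (ch == '/') inv

def replace_dynamic_files_with_variales_py_alt (route_hyphonated : String) : String :=
  String.mk (pvScanB route_hyphonated.toList true false)

-- ===== PRECONDITION & SPEC =====
def Spec_replace_dynamic_files_with_variales_py (route_hyphonated : String) (out : String) : Prop := out = replace_dynamic_files_with_variales_py_alt route_hyphonated
instance (route_hyphonated : String) (out : String) : Decidable (Spec_replace_dynamic_files_with_variales_py route_hyphonated out) := by unfold Spec_replace_dynamic_files_with_variales_py; infer_instance

-- ===== CLAIM (what is proved, stated in full; the proofs are below) =====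
def Claim_equal_replace_dynamic_files_with_variales_py : Prop := ∀ (route_hyphonated : String), Dom_replace_dynamic_files_with_variales_py route_hyphonated → Spec_replace_dynamic_files_with_variales_py route_hyphonated (replace_dynamic_files_with_variales_py route_hyphonated)

-- ===== LEMMAS AND PROOFS =====

-- reference segment splitter (structural; proved equal to PySem.Chars.splitOn on sep = "/")
def pvSegs : List Char → List (List Char)
  | [] => [[]]
  | c :: rest => if c = '/' then [] :: pvSegs rest else (pvSegs rest).modifyHead (c :: ·)

-- per-segment rewrite, exactly A's loop body
def pvG (route : List Char) : List Char :=
  if PySem.Chars.startswith route ['-'] then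
    '{' :: PySem.Chars.replace (pvReplaceFirst1 route) ['-'] ['_'] ++ ['}']
  else route

def pvRepl (c : Char) : Char := if c = '-' then '_' else c

def pvRest (ss : List (List Char)) : List Char :=
  match ss with
  | [] => []
  | _ :: _ => '/' :: PySem.Chars.join ['/'] (ss.map pvG)

theorem pvSegs_ne_nil (cs : List Char) : pvSegs cs ≠ [] := by
  induction cs with
  | nil => simp [pvSegs]
  | cons c rest ih =>
    simp only [pvSegs]
    split
    · simp
    · cases h : pvSegs rest with
      | nil => exact absurd h ih
      | cons a l => simp [List.modifyHead]

theorem pvJoin_cons (a : List Char) (l : List (List Char)) :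
    PySem.Chars.join ['/'] (pvG a :: l.map pvG) = pvG a ++ pvRest l := by
  cases l with
  | nil => simp [PySem.Chars.join, pvRest, List.intercalate]
  | cons b m => simp [PySem.Chars.join, pvRest, List.intercalate, List.intersperse]

theorem pvReplace_go_spec (l : List Char) : ∀ fuel acc, l.length ≤ fuel →
    PySem.Chars.replace.go ['-'] ['_'] fuel l acc = acc.reverse ++ l.map pvRepl := by
  induction l with
  | nil => intro fuel acc h; cases fuel <;> simp [PySem.Chars.replace.go]
  | cons c t ih =>
    intro fuel acc h
    cases fuel with
    | zero => simp at h
    | succ n =>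
      simp only [PySem.Chars.replace.go]
      by_cases hc : c = '-'
      · subst hc
        rw [if_pos (by simp [List.isPrefixOf])]
        simp only [List.length_cons, List.length_nil, List.drop_succ_cons, List.drop_zero]
        simp only [List.length_cons] at h
        rw [ih n _ (by omega)]
        simp [pvRepl]
      · rw [if_neg (by simp only [List.isPrefixOf, List.isPrefixOf_nil_left, Bool.and_true, beq_iff_eq]; exact fun hx => hc hx.symm)]
        simp only [List.length_cons] at h
        rw [ih n _ (by omega)]
        simp [pvRepl, hc]

theorem pvReplace_map (l : List Char) :
    PySem.Chars.replace l ['-'] ['_'] = l.map pvRepl := by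
  simp only [PySem.Chars.replace, List.isEmpty_cons, if_neg]
  exact pvReplace_go_spec l l.length [] le_rfl

theorem pvSplitOn_go_spec (l : List Char) : ∀ fuel cur acc, l.length ≤ fuel →
    PySem.Chars.splitOn.go ['/'] fuel l cur acc =
      acc.reverse ++ (pvSegs l).modifyHead (cur.reverse ++ ·) := by
  induction l with
  | nil => intro fuel cur acc h; cases fuel <;> simp [PySem.Chars.splitOn.go, pvSegs, List.modifyHead]
  | cons c t ih =>
    intro fuel cur acc h
    cases fuel with
    | zero => simp at h
    | succ n =>
      simp only [PySem.Chars.splitOn.go]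
      by_cases hc : c = '/'
      · subst hc
        rw [if_pos (by simp [List.isPrefixOf])]
        simp only [List.length_cons, List.length_nil, List.drop_succ_cons, List.drop_zero]
        simp only [List.length_cons] at h
        rw [ih n _ _ (by omega)]
        simp only [pvSegs, if_pos rfl, List.modifyHead, List.reverse_cons, List.append_assoc,
          List.reverse_nil, List.nil_append, List.singleton_append]
        cases pvSegs t <;> simp
      · rw [if_neg (by simp only [List.isPrefixOf, List.isPrefixOf_nil_left, Bool.and_true, beq_iff_eq]; exact fun hx => hc hx.symm)]
        simp only [List.length_cons] at h
        rw [ih n _ _ (by omega)]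
        simp only [pvSegs, if_neg hc]
        cases hs : pvSegs t with
        | nil => exact absurd hs (pvSegs_ne_nil t)
        | cons a m => simp [List.modifyHead]

theorem pvSplitOn_eq_segs (cs : List Char) :
    PySem.Chars.splitOn cs ['/'] = pvSegs cs := by
  rw [PySem.Chars.splitOn, pvSplitOn_go_spec cs (cs.length + 1) [] [] (by omega)]
  cases hs : pvSegs cs with
  | nil => exact absurd hs (pvSegs_ne_nil cs)
  | cons a m => simp [List.modifyHead]

theorem pvFoldl_map {α β : Type} (f : α → β) (l : List α) (acc : List β) :
    l.foldl (fun a r => a ++ [f r]) acc = acc ++ l.map f := by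
  induction l generalizing acc with
  | nil => simp
  | cons x xs ih => simp [List.foldl_cons, ih]

theorem pvG_dash (t : List Char) : pvG ('-' :: t) = '{' :: t.map pvRepl ++ ['}'] := by
  simp [pvG, PySem.Chars.startswith_iff, List.prefix_cons_iff, pvReplaceFirst1, pvReplace_map]

theorem pvG_not_dash (c : Char) (t : List Char) (hc : c ≠ '-') : pvG (c :: t) = c :: t := by
  rw [pvG, if_neg]
  rw [PySem.Chars.startswith_iff]
  simp only [List.prefix_cons_iff]
  intro hx
  rcases hx with hx | ⟨t1, h1, -⟩
  · simp at hx
  · exact hc (by injection h1 with h1' _; exact h1'.symm)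

theorem pvG_nil : pvG [] = [] := by
  rw [pvG, if_neg]
  rw [PySem.Chars.startswith_iff]
  simp

-- the scan, characterised against the segment view, in its three states
theorem pvScan_spec (cs : List Char) :
    (∀ h t, pvSegs cs = h :: t →
        pvScanB cs false false = h ++ pvRest t ∧
        pvScanB cs false true = h.map pvRepl ++ '}' :: pvRest t ∧
        pvScanB cs true false = pvG h ++ pvRest t) := by
  induction cs with
  | nil =>
    intro h t hs
    simp only [pvSegs] at hs
    cases hs
    simp [pvScanB, pvRest, pvG_nil]
  | cons c rest ih =>
    intro h t hs
    obtain ⟨h', t', hs'⟩ : ∃ h' t', pvSegs rest = h' :: t' := by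
      cases hx : pvSegs rest with
      | nil => exact absurd hx (pvSegs_ne_nil rest)
      | cons a m => exact ⟨a, m, rfl⟩
    obtain ⟨ihf, iht, ihm⟩ := ih h' t' hs'
    by_cases hc : c = '/'
    · subst hc
      simp only [pvSegs, if_pos rfl, hs'] at hs
      cases hs
      refine ⟨?_, ?_, ?_⟩ <;>
        simp [pvScanB, ihm, pvRest, hs', pvJoin_cons, pvG_nil]
    · simp only [pvSegs, if_neg hc, hs', List.modifyHead] at hs
      cases hs
      have hcf : (c == '/') = false := by simp [hc]
      by_cases hd : c = '-'
      · subst hd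
        refine ⟨?_, ?_, ?_⟩
        · simp [pvScanB, ihf]
        · simp [pvScanB, iht, pvRepl]
        · simp [pvScanB, iht, pvG_dash]
      · have hdf : (c == '-') = false := by simp [hd]
        refine ⟨?_, ?_, ?_⟩
        · simp [pvScanB, ihf, hcf, hdf]
        · simp [pvScanB, iht, hcf, hdf, pvRepl, hd]
        · simp [pvScanB, ihf, hcf, hdf, pvG_not_dash c h' hd]

theorem pvScan_main (cs : List Char) :
    pvScanB cs true false = PySem.Chars.join ['/'] ((pvSegs cs).map pvG) := by
  obtain ⟨h, t, hs⟩ : ∃ h t, pvSegs cs = h :: t := by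
    cases hx : pvSegs cs with
    | nil => exact absurd hx (pvSegs_ne_nil cs)
    | cons a m => exact ⟨a, m, rfl⟩
  rw [hs, List.map_cons, pvJoin_cons, ← (pvScan_spec cs h t hs).2.2]

-- ===== VERDICT (by name: the statement is the Claim_ definition above) =====
theorem replace_dynamic_files_with_variales_py_spec : Claim_equal_replace_dynamic_files_with_variales_py := by
  intro s _
  unfold Spec_replace_dynamic_files_with_variales_py
  unfold replace_dynamic_files_with_variales_py replace_dynamic_files_with_variales_py_alt
  simp only [pvSplitOn_eq_segs, pvFoldl_map, List.nil_append, pvScan_main]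
  rfl
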